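-- pv_equiv track=rewrite | github.com/A-Farhan/sequence_diversity_ecoli_TFs | utilities3/basic.py | selbydist
-- ===== SOURCE A (Python) =====
-- def selbydist( dm, cut, objects):
--     # no. of objects
--     R = len(objects)
--     # initialize set of selected indices with the first one
--     sel = {0}
--     # empty set for the indices to be removed
--     removed = set()
--     # for every index, except the last
--     for x in range(0,R-1):
--         # if it is present in "removed", skip to next index
--         if x in removed: continue
--         # for every index following the present one
--         for y in range(x+1,R):
--             # if it is present in "removed", skip to next index
--             if y in removed: continue
--             # otherwise, get the distance between runs corresponding to these two indices
--             d = dm[x,y]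
--             # if it is more than threshold, select the second index
--             if d > cut:
--                 sel.add(y)
--             # else, mask it from further consideration
--             else:
--                 removed.add(y)
--                 # if the second index was already selected, remove it
--                 if y in sel:
--                     sel.remove(y)
--     # get runs corresponding to selected indices
--     out = [ i for x,i in enumerate(objects) if x in sel]
--     return out
-- ===== SOURCE B (Python) =====
-- def selbydist(dm, cut, objects):
--     R = len(objects)
--     # build the selected index list greedily: keep y iff it is farther than
--     # cut from every index already kept
--     sel = [0]
--     for y in range(1, R):
--         if all(dm[x, y] > cut for x in sel):
--             sel.append(y)
--     selset = set(sel)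
--     return [obj for i, obj in enumerate(objects) if i in selset]
-- ===== Notes on version B (the rewrite author's own statement) =====
-- stated objective: simpler
-- what changed: Replaces the two-set x-major sieve (sel/removed with conditional re-removal from sel) by a y-major greedy that builds the selected index list in a single pass, keeping y iff it is beyond cut from every already-kept index; Pre_ excludes dms that lack a key (i,j) for some pair i<j<len(objects): A raises KeyError when the missing pair is between surviving indices, and returns only by accident when the missing keys involve indices already removed.
-- outside the precondition, e.g. on selbydist({(0, 1): 0, (0, 2): 5}, 0, [10, 20, 30]): A returns [10, 30], B returns [10, 30]
import Mathlib
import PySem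

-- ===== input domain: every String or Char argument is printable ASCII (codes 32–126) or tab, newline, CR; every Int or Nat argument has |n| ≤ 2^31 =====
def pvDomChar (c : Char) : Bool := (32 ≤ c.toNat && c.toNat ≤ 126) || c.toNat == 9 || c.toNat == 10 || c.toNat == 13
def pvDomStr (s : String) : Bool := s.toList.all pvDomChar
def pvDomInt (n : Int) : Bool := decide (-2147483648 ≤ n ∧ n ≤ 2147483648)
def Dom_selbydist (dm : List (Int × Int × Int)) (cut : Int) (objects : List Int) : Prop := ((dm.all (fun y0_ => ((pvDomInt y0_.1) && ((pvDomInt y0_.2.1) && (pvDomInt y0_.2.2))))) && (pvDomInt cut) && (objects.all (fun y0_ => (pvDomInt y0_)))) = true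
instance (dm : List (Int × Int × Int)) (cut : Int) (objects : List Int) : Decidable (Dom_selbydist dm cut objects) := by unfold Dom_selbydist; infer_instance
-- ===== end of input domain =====

-- B replaces A's two-set x-major sieve by a y-major greedy building the selected
-- index list in one pass (objective: simpler); return values agree on Pre_.

-- ===== PORT A =====
-- dict lookup dm[(x,y)]: the dict key tuple is flattened into the triple, so the
-- lookup (first match on the two key components) is hand-ported here; exact.
def pvDictGet (dm : List (Int × Int × Int)) (x y : Int) : Option Int :=
  match dm with
  | [] => none
  | (a, b, d) :: t => if a == x && b == y then some d else pvDictGet t x y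

-- body of A's inner 'for y' loop; dm[x,y] is total via getD 0, the KeyError case
-- (pvDictGet = none) being excluded by Pre_selbydist
def pvAInner (dm : List (Int × Int × Int)) (cut x : Int)
    (st : PySem.Set Int × PySem.Set Int) (y : Int) : PySem.Set Int × PySem.Set Int :=
  if PySem.Set.contains st.2 y then st
  else
    let d := (pvDictGet dm x y).getD 0
    if d > cut then (PySem.Set.add st.1 y, st.2)
    else (PySem.Set.discard st.1 y, PySem.Set.add st.2 y)

-- body of A's outer 'for x' loop
def pvAOuter (dm : List (Int × Int × Int)) (cut R : Int)
    (st : PySem.Set Int × PySem.Set Int) (x : Int) : PySem.Set Int × PySem.Set Int :=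
  if PySem.Set.contains st.2 x then st
  else (PySem.List.pyRange (x + 1) R 1).foldl (pvAInner dm cut x) st

def selbydist (dm : List (Int × Int × Int)) (cut : Int) (objects : List Int) : List Int :=
  let R : Int := PySem.List.len objects
  let st := (PySem.List.pyRange 0 (R - 1) 1).foldl (pvAOuter dm cut R)
              (PySem.Set.ofList [0], PySem.Set.empty)
  (PySem.List.enumerate objects 0).foldl
    (fun out p => if PySem.Set.contains st.1 p.1 then out ++ [p.2] else out) []

-- ===== PORT B =====
-- body of B's single 'for y' loop: keep y iff it is beyond cut from every kept index
def pvBStep (dm : List (Int × Int × Int)) (cut : Int) (sel : List Int) (y : Int) : List Int :=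
  if sel.all (fun x => (pvDictGet dm x y).getD 0 > cut) then sel ++ [y] else sel

def selbydist_alt (dm : List (Int × Int × Int)) (cut : Int) (objects : List Int) : List Int :=
  let R : Int := PySem.List.len objects
  let sel := (PySem.List.pyRange 1 R 1).foldl (pvBStep dm cut) [0]
  let selset : PySem.Set Int := PySem.Set.ofList sel
  (PySem.List.enumerate objects 0).foldl
    (fun out p => if PySem.Set.contains selset p.1 then out ++ [p.2] else out) []

-- ===== PRECONDITION & SPEC =====
-- Pre_ excludes dms that lack a key (i,j) for some pair i<j<len(objects): A raises
-- KeyError when the missing pair is between surviving indices, and returns only by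
-- accident when all the missing keys involve indices already removed.
def Pre_selbydist (dm : List (Int × Int × Int)) (cut : Int) (objects : List Int) : Prop :=
  ∀ i ∈ List.range objects.length, ∀ j ∈ List.range objects.length,
    i < j → (dm.any (fun t => t.1 == (i : Int) && t.2.1 == (j : Int))) = true
instance (dm : List (Int × Int × Int)) (cut : Int) (objects : List Int) : Decidable (Pre_selbydist dm cut objects) := by unfold Pre_selbydist; infer_instance

def pvWitness_selbydist : (List (Int × Int × Int)) × Int × List Int :=
  ([(0, 1, 3), (0, 2, 0), (1, 2, 5)], 1, [7, 8, 9])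

def Spec_selbydist (dm : List (Int × Int × Int)) (cut : Int) (objects : List Int) (out : List Int) : Prop := out = selbydist_alt dm cut objects
instance (dm : List (Int × Int × Int)) (cut : Int) (objects : List Int) (out : List Int) : Decidable (Spec_selbydist dm cut objects out) := by unfold Spec_selbydist; infer_instance

-- ===== CLAIM (what is proved, stated in full; the proofs are below) =====
def Claim_equal_selbydist : Prop := ∀ (dm : List (Int × Int × Int)) (cut : Int) (objects : List Int), Dom_selbydist dm cut objects → Pre_selbydist dm cut objects → Spec_selbydist dm cut objects (selbydist dm cut objects)

-- ===== LEMMAS AND PROOFS =====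

-- B's greedy selection after considering indices 1..n, as a Nat recursion
def bselN (dm : List (Int × Int × Int)) (cut : Int) : Nat → List Int
  | 0 => [0]
  | n + 1 => pvBStep dm cut (bselN dm cut n) ((n : Int) + 1)

-- indices already selected before A's outer loop reaches x = k
def prevSel (dm : List (Int × Int × Int)) (cut : Int) : Nat → List Int
  | 0 => []
  | k + 1 => bselN dm cut k

lemma bsel_eq (dm : List (Int × Int × Int)) (cut : Int) (n : Nat) :
    (PySem.List.pyRange 1 (1 + (n : Int)) 1).foldl (pvBStep dm cut) [0] = bselN dm cut n := by
  induction n with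
  | zero =>
      rw [show (1 : Int) + ((0 : Nat) : Int) = 1 by norm_num,
          PySem.List.pyRange_one_eq_nil (by omega)]
      rfl
  | succ n ih =>
      rw [show (1 : Int) + ((n + 1 : Nat) : Int) = (1 + (n : Int)) + 1 by push_cast; ring,
          PySem.List.pyRange_one_succ_right (by omega), List.foldl_append, ih]
      show pvBStep dm cut (bselN dm cut n) (1 + (n : Int)) = bselN dm cut (n + 1)
      rw [show (1 : Int) + (n : Int) = (n : Int) + 1 by ring]
      rfl

lemma mem_bselN_bound (dm : List (Int × Int × Int)) (cut : Int) (n : Nat) (z : Int)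
    (hz : z ∈ bselN dm cut n) : z = 0 ∨ (1 ≤ z ∧ z ≤ (n : Int)) := by
  induction n with
  | zero => simp [bselN] at hz; omega
  | succ n ih =>
      simp only [bselN, pvBStep] at hz
      split at hz
      · rcases List.mem_append.mp hz with h | h
        · rcases ih h with h | h <;> [left; right] <;> push_cast <;> omega
        · right; simp at h; push_cast; omega
      · rcases ih hz with h | h <;> [left; right] <;> push_cast <;> omega

lemma zero_mem_bselN (dm : List (Int × Int × Int)) (cut : Int) (n : Nat) :
    (0 : Int) ∈ bselN dm cut n := by
  induction n with
  | zero => simp [bselN]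
  | succ n ih =>
      simp only [bselN, pvBStep]
      split
      · exact List.mem_append.mpr (Or.inl ih)
      · exact ih

lemma mem_bselN_of_le (dm : List (Int × Int × Int)) (cut : Int) {m n : Nat} (h : m ≤ n)
    {z : Int} (hz : z ∈ bselN dm cut m) : z ∈ bselN dm cut n := by
  induction n, h using Nat.le_induction with
  | base => exact hz
  | succ n hmn ih =>
      simp only [bselN, pvBStep]
      split
      · exact List.mem_append.mpr (Or.inl ih)
      · exact ih

lemma mem_bselN_iff_of_le (dm : List (Int × Int × Int)) (cut : Int) {m n : Nat} (h : m ≤ n)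
    {z : Int} (hzm : z ≤ (m : Int)) : z ∈ bselN dm cut n ↔ z ∈ bselN dm cut m := by
  constructor
  · intro hz
    induction n, h using Nat.le_induction with
    | base => exact hz
    | succ n hmn ih =>
        simp only [bselN, pvBStep] at hz
        split at hz
        · rcases List.mem_append.mp hz with h | h
          · exact ih h
          · simp at h; omega
        · exact ih hz
  · exact mem_bselN_of_le dm cut h

lemma mem_bselN_split (dm : List (Int × Int × Int)) (cut : Int) (n : Nat) (z : Int)
    (hz : z ∈ bselN dm cut n) : z = (n : Int) ∨ z ∈ prevSel dm cut n := by
  cases n with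
  | zero => simp [bselN] at hz; left; simp [hz]
  | succ n =>
      simp only [bselN, pvBStep] at hz
      split at hz
      · rcases List.mem_append.mp hz with h | h
        · right; exact h
        · left; simp at h; push_cast; omega
      · right; exact hz

lemma mem_bselN_succ_self (dm : List (Int × Int × Int)) (cut : Int) (n : Nat) :
    ((n : Int) + 1) ∈ bselN dm cut (n + 1) ↔
      ∀ x ∈ bselN dm cut n, (pvDictGet dm x ((n : Int) + 1)).getD 0 > cut := by
  constructor
  · intro h
    simp only [bselN, pvBStep] at h
    split at h
    · next htest =>
        intro x hx
        have := List.all_eq_true.mp htest x hx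
        exact of_decide_eq_true this
    · exfalso
      have := mem_bselN_bound dm cut n _ h
      omega
  · intro hall
    have htest : (bselN dm cut n).all (fun x => decide ((pvDictGet dm x ((n : Int) + 1)).getD 0 > cut)) = true :=
      List.all_eq_true.mpr (fun x hx => decide_eq_true (hall x hx))
    simp only [bselN, pvBStep]
    rw [if_pos htest]
    exact List.mem_append.mpr (Or.inr (by simp))

lemma prevSel_subset (dm : List (Int × Int × Int)) (cut : Int) (k : Nat) {x : Int}
    (hx : x ∈ prevSel dm cut k) : x ∈ bselN dm cut k := by
  cases k with
  | zero => simp [prevSel] at hx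
  | succ k => exact mem_bselN_of_le dm cut (Nat.le_succ k) hx

-- status of index z in A's 'removed' set
def RemSt (dm : List (Int × Int × Int)) (cut R : Int) (ks : List Int) (z : Int) : Prop :=
  1 ≤ z ∧ z < R ∧ ∃ x ∈ ks, x < z ∧ ¬((pvDictGet dm x z).getD 0 > cut)

-- status of index z in A's 'sel' set (v = "the first outer pass has run")
def SelSt (dm : List (Int × Int × Int)) (cut R : Int) (ks : List Int) (v : Prop) (z : Int) : Prop :=
  z = 0 ∨ (1 ≤ z ∧ z < R ∧ v ∧ ∀ x ∈ ks, x < z → (pvDictGet dm x z).getD 0 > cut)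

def AInv (dm : List (Int × Int × Int)) (cut R : Int) (k : Nat)
    (st : PySem.Set Int × PySem.Set Int) : Prop :=
  (∀ z : Int, z ∈ st.2 ↔ RemSt dm cut R (prevSel dm cut k) z) ∧
  (∀ z : Int, z ∈ st.1 ↔ SelSt dm cut R (prevSel dm cut k) (0 < k) z)

lemma levels_agree (dm : List (Int × Int × Int)) (cut R : Int) (k : Nat) (z : Int)
    (hz : z ≤ (k : Int)) :
    (RemSt dm cut R (bselN dm cut k) z ↔ RemSt dm cut R (prevSel dm cut k) z) ∧
    (SelSt dm cut R (bselN dm cut k) True z ↔ SelSt dm cut R (prevSel dm cut k) (0 < k) z) := by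
  cases k with
  | zero =>
      constructor
      · unfold RemSt
        constructor <;> rintro ⟨h1, h2, x, hx, hlt, hP⟩ <;> exfalso
        · rcases mem_bselN_bound dm cut 0 x hx with h | h <;> omega
        · simp [prevSel] at hx
      · unfold SelSt
        constructor <;> rintro (rfl | ⟨h1, h2, hv, h4⟩)
        · left; rfl
        · omega
        · left; rfl
        · omega
  | succ k =>
      have hbridge : ∀ x : Int, x < z → (x ∈ bselN dm cut (k + 1) ↔ x ∈ prevSel dm cut (k + 1)) := by
        intro x hxz
        exact mem_bselN_iff_of_le dm cut (Nat.le_succ k) (by push_cast at hz ⊢; omega)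
      constructor
      · unfold RemSt
        constructor <;> rintro ⟨h1, h2, x, hx, hlt, hP⟩
        · exact ⟨h1, h2, x, (hbridge x hlt).mp hx, hlt, hP⟩
        · exact ⟨h1, h2, x, (hbridge x hlt).mpr hx, hlt, hP⟩
      · unfold SelSt
        constructor <;> rintro (rfl | ⟨h1, h2, hv, h4⟩)
        · left; rfl
        · exact Or.inr ⟨h1, h2, Nat.succ_pos k, fun x hx hlt => h4 x ((hbridge x hlt).mpr hx) hlt⟩
        · left; rfl
        · exact Or.inr ⟨h1, h2, trivial, fun x hx hlt => h4 x ((hbridge x hlt).mp hx) hlt⟩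

def InnerInv (dm : List (Int × Int × Int)) (cut R : Int) (k : Nat) (m : Int)
    (st : PySem.Set Int × PySem.Set Int) : Prop :=
  (∀ z : Int, z ∈ st.2 ↔
      (if z < m then RemSt dm cut R (bselN dm cut k) z
       else RemSt dm cut R (prevSel dm cut k) z)) ∧
  (∀ z : Int, z ∈ st.1 ↔
      (if z < m then SelSt dm cut R (bselN dm cut k) True z
       else SelSt dm cut R (prevSel dm cut k) (0 < k) z))

lemma ite_iff_shift {X Y : Prop} {z m : Int} (hzm : z ≠ m) :
    (if z < m + 1 then X else Y) ↔ (if z < m then X else Y) := by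
  by_cases h : z < m
  · rw [if_pos h, if_pos (by omega)]
  · rw [if_neg h, if_neg (by omega)]

lemma inner_step (dm : List (Int × Int × Int)) (cut R : Int) (k : Nat)
    (hksel : (k : Int) ∈ bselN dm cut k) (m : Int) (hm1 : (k : Int) < m) (hmR : m < R)
    (st : PySem.Set Int × PySem.Set Int) (h : InnerInv dm cut R k m st) :
    InnerInv dm cut R k (m + 1) (pvAInner dm cut (k : Int) st m) := by
  obtain ⟨hrem, hsel⟩ := h
  have hm0 : (1 : Int) ≤ m := by omega
  simp only [pvAInner]
  by_cases hcase : m ∈ st.2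
  · rw [if_pos ((PySem.Set.contains_iff _ _).mpr hcase)]
    have hR : RemSt dm cut R (prevSel dm cut k) m := by
      have := (hrem m).mp hcase
      rwa [if_neg (by omega)] at this
    obtain ⟨h1, h2, x, hx, hlt, hP⟩ := hR
    constructor <;> intro z <;> by_cases hzm : z = m
    · subst hzm
      rw [hrem z, if_neg (by omega), if_pos (by omega)]
      constructor <;> intro _
      · exact ⟨h1, h2, x, prevSel_subset dm cut k hx, hlt, hP⟩
      · exact ⟨h1, h2, x, hx, hlt, hP⟩
    · rw [hrem z]; exact (ite_iff_shift hzm).symm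
    · subst hzm
      rw [hsel z, if_neg (by omega), if_pos (by omega)]
      constructor <;> rintro (rfl | ⟨g1, g2, gv, g4⟩)
      · omega
      · exact absurd (g4 x hx hlt) hP
      · omega
      · exact absurd (g4 x (prevSel_subset dm cut k hx) hlt) hP
    · rw [hsel z]; exact (ite_iff_shift hzm).symm
  · rw [if_neg (fun hc => hcase ((PySem.Set.contains_iff _ _).mp hc))]
    have hnR : ¬ RemSt dm cut R (prevSel dm cut k) m := by
      intro hc
      exact hcase ((hrem m).mpr (by rw [if_neg (by omega)]; exact hc))
    by_cases hd : (pvDictGet dm (k : Int) m).getD 0 > cut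
    · rw [if_pos hd]
      constructor <;> intro z <;> by_cases hzm : z = m
      · subst hzm
        show z ∈ st.2 ↔ _
        rw [if_pos (by omega)]
        constructor
        · intro hz
          exact absurd ((hrem z).mp hz) (by rw [if_neg (by omega)]; exact hnR)
        · rintro ⟨h1, h2, x, hx, hlt, hP⟩
          rcases mem_bselN_split dm cut k x hx with rfl | hx'
          · exact absurd hd hP
          · exact absurd ⟨h1, h2, x, hx', hlt, hP⟩ hnR
      · show z ∈ st.2 ↔ _
        rw [hrem z]; exact (ite_iff_shift hzm).symm
      · subst hzm
        show z ∈ PySem.Set.add st.1 z ↔ _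
        rw [if_pos (by omega)]
        constructor
        · intro _
          refine Or.inr ⟨hm0, hmR, trivial, fun x hx hlt => ?_⟩
          rcases mem_bselN_split dm cut k x hx with rfl | hx'
          · exact hd
          · by_contra hP
            exact hnR ⟨hm0, hmR, x, hx', hlt, hP⟩
        · intro _
          exact (PySem.Set.mem_add _ _ _).mpr (Or.inr rfl)
      · show z ∈ PySem.Set.add st.1 m ↔ _
        rw [propext (PySem.Set.mem_add _ _ _)]
        constructor
        · rintro (hz | rfl)
          · exact ((ite_iff_shift hzm).mpr ((hsel z).mp hz))
          · exact absurd rfl hzm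
        · intro hz
          exact Or.inl ((hsel z).mpr ((ite_iff_shift hzm).mp hz))
    · rw [if_neg hd]
      constructor <;> intro z <;> by_cases hzm : z = m
      · subst hzm
        show z ∈ PySem.Set.add st.2 z ↔ _
        rw [if_pos (by omega)]
        constructor
        · intro _
          exact ⟨hm0, hmR, (k : Int), hksel, hm1, hd⟩
        · intro _
          exact (PySem.Set.mem_add _ _ _).mpr (Or.inr rfl)
      · show z ∈ PySem.Set.add st.2 m ↔ _
        rw [propext (PySem.Set.mem_add _ _ _)]
        constructor
        · rintro (hz | rfl)
          · exact ((ite_iff_shift hzm).mpr ((hrem z).mp hz))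
          · exact absurd rfl hzm
        · intro hz
          exact Or.inl ((hrem z).mpr ((ite_iff_shift hzm).mp hz))
      · subst hzm
        show z ∈ PySem.Set.discard st.1 z ↔ _
        rw [if_pos (by omega)]
        constructor
        · intro hz
          exact absurd ((PySem.Set.mem_discard _ _ _).mp hz).2 (by simp)
        · rintro (rfl | ⟨g1, g2, gv, g4⟩)
          · omega
          · exact absurd (g4 (k : Int) hksel hm1) hd
      · show z ∈ PySem.Set.discard st.1 m ↔ _
        rw [propext (PySem.Set.mem_discard _ _ _)]
        constructor
        · rintro ⟨hz, _⟩
          exact ((ite_iff_shift hzm).mpr ((hsel z).mp hz))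
        · intro hz
          exact ⟨(hsel z).mpr ((ite_iff_shift hzm).mp hz), hzm⟩

lemma inner_fold (dm : List (Int × Int × Int)) (cut R : Int) (k : Nat)
    (hksel : (k : Int) ∈ bselN dm cut k)
    (st : PySem.Set Int × PySem.Set Int) (h : InnerInv dm cut R k ((k : Int) + 1) st) :
    ∀ n : Nat, (k : Int) + 1 + (n : Int) ≤ R →
      InnerInv dm cut R k ((k : Int) + 1 + (n : Int))
        ((PySem.List.pyRange ((k : Int) + 1) ((k : Int) + 1 + (n : Int)) 1).foldl
          (pvAInner dm cut (k : Int)) st) := by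
  intro n
  induction n with
  | zero =>
      intro _
      rw [show ((k : Int) + 1 + ((0 : Nat) : Int)) = (k : Int) + 1 by norm_num,
          PySem.List.pyRange_one_eq_nil (by omega)]
      exact h
  | succ n ih =>
      intro hR
      have hR' : (k : Int) + 1 + (n : Int) ≤ R := by push_cast at hR ⊢; omega
      rw [show ((k : Int) + 1 + ((n + 1 : Nat) : Int)) = ((k : Int) + 1 + (n : Int)) + 1 by push_cast; ring,
          PySem.List.pyRange_one_succ_right (by omega), List.foldl_append]
      exact inner_step dm cut R k hksel _ (by omega) (by omega) _ (ih hR')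

lemma outer_fold (dm : List (Int × Int × Int)) (cut R : Int) (n : Nat)
    (hn : (n : Int) ≤ R - 1) :
    AInv dm cut R n ((PySem.List.pyRange 0 (n : Int) 1).foldl (pvAOuter dm cut R)
      (PySem.Set.ofList [0], PySem.Set.empty)) := by
  induction n with
  | zero =>
      rw [show (((0 : Nat) : Int)) = 0 by norm_num, PySem.List.pyRange_one_eq_nil (by omega)]
      constructor <;> intro z
      · simp [PySem.Set.empty, RemSt, prevSel]
      · simp only [PySem.Set.ofList, prevSel, SelSt]
        constructor
        · intro hz; left
          simpa using hz
        · rintro (rfl | ⟨h1, h2, hv, h4⟩)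
          · simp [PySem.Set.add, PySem.Set.empty]
          · exact absurd hv (by omega)
  | succ n ih =>
      have hn' : (n : Int) ≤ R - 1 := by push_cast at hn ⊢; omega
      have hR2 : (n : Int) + 1 ≤ R - 1 := by push_cast at hn ⊢; omega
      obtain ⟨hrem, hsel⟩ := ih hn'
      rw [show (((n + 1 : Nat)) : Int) = (n : Int) + 1 by push_cast; ring,
          PySem.List.pyRange_one_succ_right (by omega), List.foldl_append]
      simp only [List.foldl_cons, List.foldl_nil]
      set stn := (PySem.List.pyRange 0 (n : Int) 1).foldl (pvAOuter dm cut R)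
        (PySem.Set.ofList [0], PySem.Set.empty) with hstn
      show AInv dm cut R (n + 1) (pvAOuter dm cut R stn (n : Int))
      unfold pvAOuter
      by_cases hns : ((n : Int)) ∈ bselN dm cut n
      · -- x = n survives: run the inner pass
        have hgood : ∀ x ∈ prevSel dm cut n, (pvDictGet dm x (n : Int)).getD 0 > cut := by
          cases n with
          | zero => intro x hx; simp [prevSel] at hx
          | succ n' =>
              intro x hx
              have := (mem_bselN_succ_self dm cut n').mp (by push_cast at hns ⊢; exact_mod_cast hns)
              have hx' := this x hx
              push_cast at hx' ⊢; exact_mod_cast hx'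
        have hnotrem : ¬ ((n : Int) ∈ stn.2) := by
          rw [hrem]
          rintro ⟨h1, h2, x, hx, hlt, hP⟩
          exact hP (hgood x hx)
        rw [if_neg (fun hc => hnotrem ((PySem.Set.contains_iff _ _).mp hc))]
        have hbase : InnerInv dm cut R n ((n : Int) + 1) stn := by
          constructor <;> intro z
          · rw [hrem z]; split_ifs with hzlt
            · exact ((levels_agree dm cut R n z (by omega)).1).symm
            · exact Iff.rfl
          · rw [hsel z]; split_ifs with hzlt
            · exact ((levels_agree dm cut R n z (by omega)).2).symm
            · exact Iff.rfl
        have hn2 : (n : Int) + 1 + ((R - ((n : Int) + 1)).toNat : Int) = R := by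
          rw [Int.toNat_of_nonneg (by omega)]; ring
        have hinner := inner_fold dm cut R n hns stn hbase (R - ((n : Int) + 1)).toNat
          (le_of_eq hn2)
        rw [hn2] at hinner
        obtain ⟨hrem', hsel'⟩ := hinner
        constructor <;> intro z
        · rw [hrem' z]; split_ifs with hzR
          · show RemSt dm cut R (bselN dm cut n) z ↔ RemSt dm cut R (prevSel dm cut (n + 1)) z
            exact Iff.rfl
          · unfold RemSt
            constructor <;> rintro ⟨h1, h2, hx⟩ <;> omega
        · rw [hsel' z]; split_ifs with hzR
          · show SelSt dm cut R (bselN dm cut n) True z ↔ SelSt dm cut R (prevSel dm cut (n + 1)) (0 < n + 1) z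
            unfold SelSt
            simp [prevSel]
          · unfold SelSt
            constructor <;> rintro (rfl | ⟨h1, h2, hx⟩) <;> omega
      · -- x = n was removed: skip
        have hn1 : 1 ≤ n := by
          by_contra hc
          interval_cases n
          · exact hns (by simp [bselN])
        obtain ⟨n', rfl⟩ : ∃ n', n = n' + 1 := ⟨n - 1, by omega⟩
        have hnall : ¬ ∀ x ∈ bselN dm cut n', (pvDictGet dm x ((n' : Int) + 1)).getD 0 > cut := by
          intro hall
          exact hns (by
            have := (mem_bselN_succ_self dm cut n').mpr hall
            push_cast; exact_mod_cast this)
        have hpeq : bselN dm cut (n' + 1) = bselN dm cut n' := by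
          simp only [bselN, pvBStep]
          rw [if_neg (fun ht => hnall (fun x hx => of_decide_eq_true (List.all_eq_true.mp ht x hx)))]
        have hinrem : ((n' + 1 : Nat) : Int) ∈ stn.2 := by
          rw [hrem]
          push_neg at hnall
          obtain ⟨x, hx, hP⟩ := hnall
          refine ⟨by push_cast; omega, by push_cast at hn ⊢; omega, x, hx, ?_, ?_⟩
          · rcases mem_bselN_bound dm cut n' x hx with h | h <;> push_cast <;> omega
          · rw [show (((n' + 1 : Nat)) : Int) = (n' : Int) + 1 by push_cast; ring]
            exact not_lt.mpr (by exact_mod_cast hP)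
        rw [if_pos ((PySem.Set.contains_iff _ _).mpr hinrem)]
        have hps : prevSel dm cut (n' + 1 + 1) = prevSel dm cut (n' + 1) := by
          show bselN dm cut (n' + 1) = bselN dm cut n'
          exact hpeq
        constructor <;> intro z
        · rw [hrem z, hps]
        · rw [hsel z, hps]
          unfold SelSt
          constructor <;> rintro (rfl | ⟨h1, h2, hv, h4⟩)
          · left; rfl
          · exact Or.inr ⟨h1, h2, Nat.succ_pos _, h4⟩
          · left; rfl
          · exact Or.inr ⟨h1, h2, Nat.succ_pos _, h4⟩

lemma sel_eq_bsel (dm : List (Int × Int × Int)) (cut : Int) (L : Nat) (hL : 1 ≤ L) (z : Int) :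
    SelSt dm cut (L : Int) (prevSel dm cut (L - 1)) (0 < L - 1) z ↔ z ∈ bselN dm cut (L - 1) := by
  by_cases hz0 : z = 0
  · subst hz0
    constructor
    · intro _; exact zero_mem_bselN dm cut (L - 1)
    · intro _; exact Or.inl rfl
  · constructor
    · rintro (rfl | ⟨h1, h2, hv, h4⟩)
      · exact absurd rfl hz0
      · have hL2 : 2 ≤ L := by omega
        set zN := z.toNat with hzN
        have hzz : (zN : Int) = z := Int.toNat_of_nonneg (by omega)
        have hzL : zN ≤ L - 1 := by omega
        have h1' : 1 ≤ zN := by omega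
        rw [← hzz, mem_bselN_iff_of_le dm cut hzL (by omega)]
        have hchar := mem_bselN_succ_self dm cut (zN - 1)
        rw [show zN - 1 + 1 = zN from by omega,
            show ((zN - 1 : Nat) : Int) + 1 = (zN : Int) from by omega] at hchar
        refine hchar.mpr ?_
        intro x hx
        have hxb := mem_bselN_bound dm cut (zN - 1) x hx
        have hxlt : x < z := by omega
        have hxp : x ∈ prevSel dm cut (L - 1) := by
          rw [show L - 1 = (L - 2) + 1 from by omega]
          show x ∈ bselN dm cut (L - 2)
          exact mem_bselN_of_le dm cut (by omega) hx
        have := h4 x hxp hxlt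
        rwa [hzz]
    · intro hz
      have hb := mem_bselN_bound dm cut (L - 1) z hz
      right
      set zN := z.toNat with hzN
      have hzz : (zN : Int) = z := Int.toNat_of_nonneg (by omega)
      have hzL : zN ≤ L - 1 := by omega
      refine ⟨by omega, by omega, by omega, ?_⟩
      intro x hxp hxlt
      have hx2 : x ∈ bselN dm cut (L - 2) := by
        rw [show L - 1 = (L - 2) + 1 from by omega] at hxp
        exact hxp
      have hx1 : x ∈ bselN dm cut (zN - 1) :=
        (mem_bselN_iff_of_le dm cut (show zN - 1 ≤ L - 2 by omega)
          (show x ≤ ((zN - 1 : Nat) : Int) by omega)).mp hx2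
      have hzsel : z ∈ bselN dm cut zN := (mem_bselN_iff_of_le dm cut hzL (by omega)).mp hz
      have hchar := mem_bselN_succ_self dm cut (zN - 1)
      rw [show zN - 1 + 1 = zN from by omega,
          show ((zN - 1 : Nat) : Int) + 1 = (zN : Int) from by omega, hzz] at hchar
      exact hchar.mp hzsel x hx1

-- ===== VERDICT (by name: the statement is the Claim_ definition above) =====
theorem selbydist_spec : Claim_equal_selbydist := by
  intro dm cut objects hdom hpre
  show selbydist dm cut objects = selbydist_alt dm cut objects
  rcases Nat.eq_zero_or_pos objects.length with hL | hL
  · have : objects = [] := List.length_eq_zero_iff.mp hL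
    subst this
    rfl
  · set L := objects.length with hLdef
    have hB : (PySem.List.pyRange 1 ((L : Nat) : Int) 1).foldl (pvBStep dm cut) [0]
        = bselN dm cut (L - 1) := by
      rw [show ((L : Nat) : Int) = 1 + ((L - 1 : Nat) : Int) from by omega]
      exact bsel_eq dm cut (L - 1)
    have hA := outer_fold dm cut ((L : Nat) : Int) (L - 1) (by omega)
    rw [show (((L - 1 : Nat)) : Int) = ((L : Nat) : Int) - 1 from by omega] at hA
    obtain ⟨hrem, hsel⟩ := hA
    have hbool : ∀ w : Int,
        PySem.Set.contains ((PySem.List.pyRange 0 (((L : Nat) : Int) - 1) 1).foldl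
          (pvAOuter dm cut ((L : Nat) : Int)) (PySem.Set.ofList [0], PySem.Set.empty)).1 w
        = PySem.Set.contains (PySem.Set.ofList
            ((PySem.List.pyRange 1 ((L : Nat) : Int) 1).foldl (pvBStep dm cut) [0])) w := by
      intro w
      refine Bool.eq_iff_iff.mpr ?_
      rw [PySem.Set.contains_iff, PySem.Set.contains_iff, hsel w, PySem.Set.mem_ofList, hB]
      exact sel_eq_bsel dm cut L hL w
    simp only [selbydist, selbydist_alt]
    rw [PySem.List.foldl_append_if, PySem.List.foldl_append_if]
    simp only [List.nil_append]
    refine congrArg (List.map _) ?_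
    exact List.filter_congr (fun q _ => hbool q.1)
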